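-- pv_equiv track=rewrite | github.com/brianw1130/atm-simulator | src/atm/utils/formatting.py | mask_account_number
-- ===== SOURCE A (Python) =====
-- def mask_account_number(account_number: str) -> str:
--     """Mask all characters except the last 4 with asterisks, preserving hyphens.
--
--     Examples:
--         >>> mask_account_number("1000-0001-0001")
--         '****-****-0001'
--         >>> mask_account_number("12345678")
--         '****5678'
--         >>> mask_account_number("AB")
--         'AB'
--
--     Args:
--         account_number: The account number string to mask.
--
--     Returns:
--         The masked account number. If the string (excluding hyphens)
--         has 4 or fewer characters, it is returned unchanged.
--     """
--     if not account_number: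
--         return account_number
--
--     non_hyphen_chars = [c for c in account_number if c != "-"]
--     if len(non_hyphen_chars) <= 4:
--         return account_number
--
--     chars_to_mask = len(non_hyphen_chars) - 4
--     masked_count = 0
--     result: list[str] = []
--     for char in account_number:
--         if char == "-":
--             result.append("-")
--         elif masked_count < chars_to_mask:
--             result.append("*")
--             masked_count += 1
--         else:
--             result.append(char)
--     return "".join(result)
-- ===== SOURCE B (Python) =====
-- def mask_account_number(account_number: str) -> str:
--     """Two-phase: find the split index by scanning from the right for the 4th
--     non-hyphen, then mask the prefix region and copy the suffix verbatim."""
--     if not account_number: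
--         return account_number
--     seen = 0
--     suffix_len = None
--     for j, c in enumerate(reversed(account_number)):
--         if c != "-":
--             seen += 1
--             if seen == 4:
--                 suffix_len = j + 1
--                 break
--     if suffix_len is None:
--         return account_number
--     split = len(account_number) - suffix_len
--     masked = "".join("-" if c == "-" else "*" for c in account_number[:split])
--     return masked + account_number[split:]
-- ===== Notes on version B (the rewrite author's own statement) =====
-- stated objective: alternative
-- what changed: Replaces A's single stateful left-to-right masking loop (counting masked characters against a quota) with a two-phase decomposition: a right-to-left scan locates the index where the visible 4-non-hyphen suffix begins, then the string is rebuilt as a character-wise masked prefix concatenated with a verbatim suffix slice.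
import Mathlib
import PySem

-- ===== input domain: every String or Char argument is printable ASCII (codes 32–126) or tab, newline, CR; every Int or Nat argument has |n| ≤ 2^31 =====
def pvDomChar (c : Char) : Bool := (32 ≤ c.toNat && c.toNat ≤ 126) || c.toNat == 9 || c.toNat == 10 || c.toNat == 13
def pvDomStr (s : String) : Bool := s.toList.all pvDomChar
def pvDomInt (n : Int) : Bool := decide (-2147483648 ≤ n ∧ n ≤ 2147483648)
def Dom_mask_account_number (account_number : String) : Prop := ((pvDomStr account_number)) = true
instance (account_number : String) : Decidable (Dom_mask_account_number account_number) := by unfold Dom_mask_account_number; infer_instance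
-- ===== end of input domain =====

-- ===== PORT A =====
-- B changes the decomposition: right-scan for the split point, then mask the prefix and copy the suffix verbatim; no speed claim.
-- A's loop: hyphens copied; other chars become '*' while masked_count < chars_to_mask, else copied.
def maskA_loop : List Char → Int → Int → List Char
  | [], _, _ => []
  | c :: rest, chars_to_mask, masked_count =>
    if c = '-' then '-' :: maskA_loop rest chars_to_mask masked_count
    else if masked_count < chars_to_mask then '*' :: maskA_loop rest chars_to_mask (masked_count + 1)
    else c :: maskA_loop rest chars_to_mask masked_count

def mask_account_number (account_number : String) : String :=
  if account_number.toList = [] then account_number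
  else
    let non_hyphen_chars := account_number.toList.filter (fun c => c ≠ '-')
    if non_hyphen_chars.length ≤ 4 then account_number
    else
      let chars_to_mask : Int := (non_hyphen_chars.length : Int) - 4
      String.ofList (maskA_loop account_number.toList chars_to_mask 0)

-- ===== PORT B =====
-- scan of reversed(account_number) with enumerate/break: returns the suffix length (j+1)
-- at the 4th non-hyphen, none if fewer than 4 non-hyphens exist.
def findSuffixLen : List Char → Nat → Option Nat
  | [], _ => none
  | c :: rest, seen =>
    if c = '-' then (findSuffixLen rest seen).map (· + 1)
    else if seen + 1 = 4 then some 1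
    else (findSuffixLen rest (seen + 1)).map (· + 1)

def mask_account_number_alt (account_number : String) : String :=
  if account_number.toList = [] then account_number
  else
    match findSuffixLen account_number.toList.reverse 0 with
    | none => account_number
    | some suffix_len =>
      let split := account_number.toList.length - suffix_len
      String.ofList (((account_number.toList.take split).map
          (fun c => if c = '-' then '-' else '*')) ++ account_number.toList.drop split)

-- ===== PRECONDITION & SPEC =====
def Spec_mask_account_number (account_number : String) (out : String) : Prop := out = mask_account_number_alt account_number
instance (account_number : String) (out : String) : Decidable (Spec_mask_account_number account_number out) := by unfold Spec_mask_account_number; infer_instance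

-- ===== CLAIM (what is proved, stated in full; the proofs are below) =====
def Claim_equal_mask_account_number : Prop := ∀ (account_number : String), Dom_mask_account_number account_number → Spec_mask_account_number account_number (mask_account_number account_number)

-- ===== LEMMAS AND PROOFS =====

/-- Reference masker: mask the first `t` non-hyphens, copy everything else. -/
def maskN : List Char → Nat → List Char
  | [], _ => []
  | c :: rest, t =>
    if c = '-' then '-' :: maskN rest t
    else if t = 0 then c :: maskN rest 0
    else '*' :: maskN rest (t - 1)

theorem maskN_zero (l : List Char) : maskN l 0 = l := by
  induction l with
  | nil => rfl
  | cons c rest ih => by_cases h : c = '-' <;> simp [maskN, h, ih]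

theorem maskA_eq_maskN (l : List Char) (t : Nat) (m k : Int) (h : m - k = t) :
    maskA_loop l m k = maskN l t := by
  induction l generalizing t k with
  | nil => rfl
  | cons c rest ih =>
    by_cases hc : c = '-'
    · simp [maskA_loop, maskN, hc, ih t k h]
    · by_cases hk : k < m
      · have ht : t ≠ 0 := by omega
        have h' : m - (k + 1) = ((t - 1 : Nat) : Int) := by omega
        simp [maskA_loop, maskN, hc, hk, ht, ih (t - 1) (k + 1) h']
      · have ht : t = 0 := by omega
        have h' : m - k = ((0 : Nat) : Int) := by omega
        simp [maskA_loop, maskN, hc, hk, ht, ih 0 k h']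

theorem maskN_split (p : Nat) (l : List Char) (t : Nat)
    (h : (l.take p).countP (fun c => !decide (c = '-')) = t) :
    maskN l t = (l.take p).map (fun c => if c = '-' then '-' else '*') ++ l.drop p := by
  induction p generalizing l t with
  | zero =>
    have : t = 0 := by simpa using h.symm
    subst this
    simp [maskN_zero]
  | succ p ih =>
    cases l with
    | nil =>
      have : t = 0 := by simpa using h.symm
      subst this
      simp [maskN_zero]
    | cons c rest =>
      by_cases hc : c = '-'
      · have h' : (rest.take p).countP (fun c => !decide (c = '-')) = t := by
          simpa [List.countP_cons, hc] using h
        simp [maskN, hc, ih rest t h']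
      · have hcnt : (rest.take p).countP (fun c => !decide (c = '-')) + 1 = t := by
          simpa [List.countP_cons, hc] using h
        have ht : t ≠ 0 := by omega
        have h' : (rest.take p).countP (fun c => !decide (c = '-')) = t - 1 := by omega
        simp [maskN, hc, ht, ih rest (t - 1) h']

theorem findSuffixLen_none (r : List Char) (seen : Nat) (hs : seen ≤ 3) :
    (findSuffixLen r seen = none ↔ r.countP (fun c => !decide (c = '-')) + seen < 4) := by
  induction r generalizing seen with
  | nil => simp [findSuffixLen]; omega
  | cons c rest ih =>
    by_cases hc : c = '-'
    · simp [findSuffixLen, hc, ih seen hs]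
    · by_cases h4 : seen + 1 = 4
      · simp [findSuffixLen, hc, h4]
        omega
      · have hs' : seen + 1 ≤ 3 := by omega
        simp [findSuffixLen, hc, h4, ih (seen + 1) hs']
        omega

theorem findSuffixLen_some (r : List Char) (seen j : Nat)
    (h : findSuffixLen r seen = some j) :
    j ≤ r.length ∧ (r.take j).countP (fun c => !decide (c = '-')) + seen = 4 := by
  induction r generalizing seen j with
  | nil => simp [findSuffixLen] at h
  | cons c rest ih =>
    by_cases hc : c = '-'
    · cases hrec : findSuffixLen rest seen with
      | none => simp [findSuffixLen, hc, hrec] at h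
      | some j' =>
        simp [findSuffixLen, hc, hrec] at h
        subst h
        obtain ⟨h1, h2⟩ := ih seen j' hrec
        constructor
        · simpa using Nat.succ_le_succ h1
        · simp [hc] at h2 ⊢
          omega
    · by_cases h4 : seen + 1 = 4
      · have hj : j = 1 := by simpa [findSuffixLen, hc, h4] using h.symm
        subst hj
        constructor
        · simp
        · cases rest <;> simp [hc] <;> omega
      · cases hrec : findSuffixLen rest (seen + 1) with
        | none => simp [findSuffixLen, hc, h4, hrec] at h
        | some j' =>
          simp [findSuffixLen, hc, h4, hrec] at h
          subst h
          obtain ⟨h1, h2⟩ := ih (seen + 1) j' hrec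
          constructor
          · simpa using Nat.succ_le_succ h1
          · simp [hc] at h2 ⊢
            omega

theorem countP_split_of_suffix (l : List Char) (j : Nat) (P : Char → Bool) :
    (l.take (l.length - j)).countP P + (l.reverse.take j).countP P = l.countP P := by
  rw [List.take_reverse, List.countP_reverse]
  conv_rhs => rw [← List.take_append_drop (l.length - j) l, List.countP_append]

-- ===== VERDICT (by name: the statement is the Claim_ definition above) =====
theorem mask_account_number_spec : Claim_equal_mask_account_number := by
  intro s _
  unfold Spec_mask_account_number mask_account_number mask_account_number_alt
  by_cases h0 : s.toList = []
  · simp [h0]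
  · simp only [h0, if_false]
    set l := s.toList with hl
    set N := l.countP (fun c => !decide (c = '-')) with hN
    have hflt : (l.filter (fun c => decide (c ≠ '-'))).length = N := by
      rw [← List.countP_eq_length_filter, hN]
      simp [ne_eq]
    cases hfs : findSuffixLen l.reverse 0 with
    | none =>
      have hlt : N < 4 := by
        have := (findSuffixLen_none l.reverse 0 (by omega)).mp hfs
        simpa [List.countP_reverse, ← hN] using this
      rw [hflt, if_pos (by omega : N ≤ 4)]
    | some j =>
      obtain ⟨hj, hcnt⟩ := findSuffixLen_some l.reverse 0 j hfs
      dsimp only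
      have hj' : j ≤ l.length := by simpa using hj
      have hsplit : (l.take (l.length - j)).countP (fun c => !decide (c = '-')) + 4 = N := by
        have := countP_split_of_suffix l j (fun c => !decide (c = '-'))
        omega
      rw [hflt]
      by_cases hle : N ≤ 4
      · -- exactly 4 non-hyphens: A returns s unchanged; B rebuilds the same string
        have ht0 : (l.take (l.length - j)).countP (fun c => !decide (c = '-')) = 0 := by omega
        have hid := maskN_split (l.length - j) l 0 ht0
        rw [maskN_zero] at hid
        rw [if_pos hle, ← hid, hl, String.ofList_toList]
      · rw [if_neg hle]
        have hA := maskA_eq_maskN l (N - 4) ((N : Int) - 4) 0 (by omega)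
        have hB := maskN_split (l.length - j) l (N - 4) (by omega)
        rw [hA, hB]
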